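-- pv_equiv track=rewrite | github.com/renzovc987/Bioapp | blast.py | get_all_option
-- ===== SOURCE A (Python) =====
-- def get_all_option(data, options=3):
--   values = []
--   for i in range(0, len(data)):
--     for j in range(0, len(data)):
--       for k in range(0, len(data)):
--         palabra = data[i] + data[j] + data[k]
--         values.append(palabra)
--   return values
-- ===== SOURCE B (Python) =====
-- def get_all_option(data, options=3):
--     # Iterative extension: each round appends one more data element to every prefix.
--     result = ['']
--     for _ in range(3):
--         result = [r + d for r in result for d in data]
--     return result
-- ===== Notes on version B (the rewrite author's own statement) =====
-- stated objective: alternative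
-- what changed: Replaces the three nested index loops with iterative prefix extension: starting from the singleton list of the empty string, three rounds of a flat comprehension each append one data element to every prefix, yielding the same lexicographic order.
import Mathlib
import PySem

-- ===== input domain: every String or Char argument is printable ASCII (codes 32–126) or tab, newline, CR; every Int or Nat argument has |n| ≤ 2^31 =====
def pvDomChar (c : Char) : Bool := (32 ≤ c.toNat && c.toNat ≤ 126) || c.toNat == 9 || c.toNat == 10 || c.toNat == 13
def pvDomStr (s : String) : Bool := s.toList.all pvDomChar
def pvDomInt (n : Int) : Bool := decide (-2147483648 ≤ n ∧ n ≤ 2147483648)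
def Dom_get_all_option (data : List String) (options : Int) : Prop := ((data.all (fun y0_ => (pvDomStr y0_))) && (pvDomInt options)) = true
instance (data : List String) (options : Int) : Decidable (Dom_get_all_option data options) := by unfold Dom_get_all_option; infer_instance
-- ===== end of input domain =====

-- ===== PORT A =====
-- B replaces the nested index loops by iterative prefix extension; equal output order, stated honestly (no speed claim).
def get_all_option (data : List String) (options : Int) : List String :=
  (PySem.List.pyRange 0 data.length 1).foldl (fun values i =>
    (PySem.List.pyRange 0 data.length 1).foldl (fun values j =>
      (PySem.List.pyRange 0 data.length 1).foldl (fun values k =>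
        values ++ [PySem.List.pyGetD data i "" ++ PySem.List.pyGetD data j "" ++ PySem.List.pyGetD data k ""])
        values)
      values)
    []

-- ===== PORT B =====
def get_all_option_alt (data : List String) (options : Int) : List String :=
  (PySem.List.pyRange 0 3 1).foldl
    (fun result _ => result.flatMap (fun r => data.map (fun d => r ++ d))) [""]

-- ===== PRECONDITION & SPEC =====
def Spec_get_all_option (data : List String) (options : Int) (out : List String) : Prop := out = get_all_option_alt data options
instance (data : List String) (options : Int) (out : List String) : Decidable (Spec_get_all_option data options out) := by unfold Spec_get_all_option; infer_instance

-- ===== CLAIM (what is proved, stated in full; the proofs are below) =====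
def Claim_equal_get_all_option : Prop := ∀ (data : List String) (options : Int), Dom_get_all_option data options → Spec_get_all_option data options (get_all_option data options)

-- ===== LEMMAS AND PROOFS =====

theorem get_all_option_a_flatMap (data : List String) (options : Int) :
    get_all_option data options =
      data.flatMap (fun x => data.flatMap (fun y => data.map (fun z => x ++ y ++ z))) := by
  unfold get_all_option
  have h1 : (fun (values : List String) (i : Int) =>
      (PySem.List.pyRange 0 ((data.length : Int)) 1).foldl (fun values j =>
        (PySem.List.pyRange 0 ((data.length : Int)) 1).foldl (fun values k =>
          values ++ [PySem.List.pyGetD data i "" ++ PySem.List.pyGetD data j "" ++ PySem.List.pyGetD data k ""])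
          values) values)
    = (fun values i => values ++ data.flatMap (fun y => data.map (fun z => PySem.List.pyGetD data i "" ++ y ++ z))) := by
    funext v i
    have h2 : (fun (values : List String) (j : Int) =>
        (PySem.List.pyRange 0 ((data.length : Int)) 1).foldl (fun values k =>
          values ++ [PySem.List.pyGetD data i "" ++ PySem.List.pyGetD data j "" ++ PySem.List.pyGetD data k ""])
          values)
      = (fun values j => values ++ data.map (fun z => PySem.List.pyGetD data i "" ++ PySem.List.pyGetD data j "" ++ z)) := by
      funext v' j
      rw [PySem.List.foldl_pyRange_zero_pyGetD'
        (f := fun acc z => acc ++ [PySem.List.pyGetD data i "" ++ PySem.List.pyGetD data j "" ++ z]) (d := "")]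
      exact PySem.List.foldl_append_singleton_eq_map _ data v'
    rw [h2,
      PySem.List.foldl_pyRange_zero_pyGetD'
        (f := fun acc y => acc ++ data.map (fun z => PySem.List.pyGetD data i "" ++ y ++ z)) (d := "")]
    exact PySem.List.foldl_append_eq_flatMap _ data v
  rw [h1,
    PySem.List.foldl_pyRange_zero_pyGetD'
      (f := fun acc x => acc ++ data.flatMap (fun y => data.map (fun z => x ++ y ++ z))) (d := "")]
  simpa using PySem.List.foldl_append_eq_flatMap
    (g := fun x => data.flatMap (fun y => data.map (fun z => x ++ y ++ z))) data []

theorem get_all_option_b_flatMap (data : List String) (options : Int) :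
    get_all_option_alt data options =
      data.flatMap (fun x => data.flatMap (fun y => data.map (fun z => x ++ y ++ z))) := by
  unfold get_all_option_alt
  have hr : PySem.List.pyRange 0 3 1 = [0, 1, 2] := by decide
  rw [hr]
  simp [List.foldl, List.flatMap_assoc, List.flatMap_map, String.append_assoc]

-- ===== VERDICT (by name: the statement is the Claim_ definition above) =====
theorem get_all_option_spec : Claim_equal_get_all_option := by
  intro data options _
  unfold Spec_get_all_option
  rw [get_all_option_a_flatMap, get_all_option_b_flatMap]
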